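-- pv_equiv track=rewrite | github.com/Saishabeer/voice-assistant-openai | voice/views.py | _build_conversation_text
-- ===== SOURCE A (Python) =====
-- from typing import Dict, List, Tuple
--
-- def _split_turns(text: str) -> List[str]:
--     """Split a multi-line transcript into simple per-line turns."""
--     if not text:
--         return []
--     lines = [ln.strip() for ln in text.split("\n")]
--     return [ln for ln in lines if ln]
--
-- def _build_conversation_text(user_text: str, ai_text: str) -> str:
--     """Build a single readable conversation column by interleaving user and AI turns."""
--     u_turns = _split_turns(user_text)
--     a_turns = _split_turns(ai_text)
--     parts: List[str] = []
--     n = max(len(u_turns), len(a_turns))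
--     for i in range(n):
--         if i < len(u_turns):
--             parts.append(f"User: {u_turns[i]}")
--         if i < len(a_turns):
--             parts.append(f"AI: {a_turns[i]}")
--     return "\n".join(parts)
-- ===== SOURCE B (Python) =====
-- from typing import List
--
-- def _split_turns(text: str) -> List[str]:
--     return [s for s in (ln.strip() for ln in text.split("\n")) if s]
--
-- def _build_conversation_text(user_text: str, ai_text: str) -> str:
--     u = _split_turns(user_text)
--     a = _split_turns(ai_text)
--     k = min(len(u), len(a))
--     paired = [f"User: {x}\nAI: {y}" for x, y in zip(u, a)]
--     tail = [f"User: {x}" for x in u[k:]] + [f"AI: {y}" for y in a[k:]]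
--     return "\n".join(paired + tail)
-- ===== Notes on version B (the rewrite author's own statement) =====
-- stated objective: idiomatic
-- what changed: Replaces the index loop over range(max(len,len)) with per-index bounds checks by zipping the two turn lists into joined User/AI pairs and appending the leftover tail slice of the longer list; _split_turns becomes a guardless comprehension.
import Mathlib
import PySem

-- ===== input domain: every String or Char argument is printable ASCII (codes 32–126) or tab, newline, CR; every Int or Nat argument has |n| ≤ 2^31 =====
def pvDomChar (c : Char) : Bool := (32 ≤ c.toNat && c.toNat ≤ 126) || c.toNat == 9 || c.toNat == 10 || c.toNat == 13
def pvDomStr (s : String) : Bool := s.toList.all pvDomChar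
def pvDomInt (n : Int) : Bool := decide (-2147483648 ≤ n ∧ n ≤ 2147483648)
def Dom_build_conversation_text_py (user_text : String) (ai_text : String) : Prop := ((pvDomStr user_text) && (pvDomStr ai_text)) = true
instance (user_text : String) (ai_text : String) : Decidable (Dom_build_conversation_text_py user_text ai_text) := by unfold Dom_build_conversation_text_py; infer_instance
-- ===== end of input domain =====

-- B replaces A's index-counting loop (range over max length with two bounds checks) by
-- pairing the two turn lists with zip and appending the leftover tail slices (objective: idiomatic).

-- ===== PORT A =====
-- _split_turns, transliterated (strings handled as List Char via the exact PySem.Chars primitives)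
def splitTurnsA (text : List Char) : List (List Char) :=
  if text = [] then []
  else
    let lines := (PySem.Chars.splitOn text ['\n']).map PySem.Chars.strip
    lines.filter (fun ln => ln ≠ [])

def build_conversation_text_py (user_text : String) (ai_text : String) : String :=
  let u := splitTurnsA user_text.toList
  let a := splitTurnsA ai_text.toList
  let n := max (PySem.List.len u) (PySem.List.len a)
  let parts := (PySem.List.pyRange 0 n 1).foldl (fun parts i =>
    let parts := if i < PySem.List.len u then parts ++ ["User: ".toList ++ PySem.List.pyGetD u i []] else parts
    if i < PySem.List.len a then parts ++ ["AI: ".toList ++ PySem.List.pyGetD a i []] else parts) []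
  String.ofList (PySem.Chars.join ['\n'] parts)

-- ===== PORT B =====
-- Source B's guardless comprehension form of _split_turns
def splitTurnsB (text : List Char) : List (List Char) :=
  ((PySem.Chars.splitOn text ['\n']).map PySem.Chars.strip).filter (fun s => s ≠ [])

def build_conversation_text_py_alt (user_text : String) (ai_text : String) : String :=
  let u := splitTurnsB user_text.toList
  let a := splitTurnsB ai_text.toList
  let k := min u.length a.length
  let paired := (u.zip a).map (fun p => "User: ".toList ++ p.1 ++ ['\n'] ++ "AI: ".toList ++ p.2)
  -- u[k:] with 0 ≤ k ≤ len u is exactly List.drop k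
  let tail := (u.drop k).map (fun x => "User: ".toList ++ x) ++ (a.drop k).map (fun y => "AI: ".toList ++ y)
  String.ofList (PySem.Chars.join ['\n'] (paired ++ tail))

-- ===== PRECONDITION & SPEC =====
def Spec_build_conversation_text_py (user_text : String) (ai_text : String) (out : String) : Prop := out = build_conversation_text_py_alt user_text ai_text
instance (user_text : String) (ai_text : String) (out : String) : Decidable (Spec_build_conversation_text_py user_text ai_text out) := by unfold Spec_build_conversation_text_py; infer_instance

-- ===== CLAIM (what is proved, stated in full; the proofs are below) =====
def Claim_equal_build_conversation_text_py : Prop := ∀ (user_text : String) (ai_text : String), Dom_build_conversation_text_py user_text ai_text → Spec_build_conversation_text_py user_text ai_text (build_conversation_text_py user_text ai_text)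

-- ===== LEMMAS AND PROOFS =====

-- the two split helpers agree
lemma splitTurns_eq (text : List Char) : splitTurnsA text = splitTurnsB text := by
  unfold splitTurnsA splitTurnsB
  rcases text with _ | ⟨c, cs⟩
  · decide
  · simp

-- the interleaved flat list both programs' joins describe
def flatTurns : List (List Char) → List (List Char) → List (List Char)
  | [], a => a.map (fun y => "AI: ".toList ++ y)
  | u, [] => u.map (fun x => "User: ".toList ++ x)
  | x :: u, y :: a => ("User: ".toList ++ x) :: ("AI: ".toList ++ y) :: flatTurns u a

lemma flatMap_singleton_eq_map {α β : Type} (f : α → β) (l : List α) :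
    l.flatMap (fun x => [f x]) = l.map f := by
  induction l <;> simp_all

lemma map_getD_range {α β : Type} (f : α → β) (d : α) (l : List α) :
    (List.range l.length).map (fun k => f (l.getD k d)) = l.map f := by
  induction l with
  | nil => simp
  | cons x xs ih =>
    simp only [List.length_cons, List.range_succ_eq_map, List.map_cons, List.map_map]
    simp only [List.getD_cons_zero]
    refine congrArg _ ?_
    simpa [Function.comp] using ih

-- A's parts list equals flatTurns
lemma partsA_eq (u a : List (List Char)) :
    (List.range (max u.length a.length)).flatMap (fun k =>
      (if k < u.length then ["User: ".toList ++ u.getD k []] else []) ++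
      (if k < a.length then ["AI: ".toList ++ a.getD k []] else [])) = flatTurns u a := by
  induction u generalizing a with
  | nil =>
    rcases a with _ | ⟨y, a⟩
    · simp [flatTurns]
    · simp only [flatTurns, List.length_nil, Nat.max_eq_right (Nat.zero_le _)]
      rw [List.flatMap_def,
        List.map_congr_left (l := List.range (y :: a).length)
          (g := fun k => [("AI: ".toList ++ (y :: a).getD k [])]) (by
            intro k hk
            simp only [List.mem_range, List.length_cons] at hk
            simp [hk]),
        ← List.flatMap_def, flatMap_singleton_eq_map, map_getD_range]
  | cons x u ih =>
    rcases a with _ | ⟨y, a⟩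
    · simp only [flatTurns, List.length_nil, Nat.max_eq_left (Nat.zero_le _)]
      rw [List.flatMap_def,
        List.map_congr_left (l := List.range (x :: u).length)
          (g := fun k => [("User: ".toList ++ (x :: u).getD k [])]) (by
            intro k hk
            simp only [List.mem_range, List.length_cons] at hk
            simp [hk]),
        ← List.flatMap_def, flatMap_singleton_eq_map, map_getD_range]
    · simp only [List.length_cons, Nat.succ_max_succ, List.range_succ_eq_map,
        List.flatMap_cons, List.flatMap_map, flatTurns]
      simp only [Nat.succ_eq_add_one, Nat.add_lt_add_iff_right, List.getD_cons_succ,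
        Nat.zero_lt_succ, if_true, List.getD_cons_zero]
      rw [ih a]
      rfl

lemma join_cons_of (sep c : List Char) {L1 L2 : List (List Char)}
    (h : PySem.Chars.join sep L1 = PySem.Chars.join sep L2) (he : L1 = [] ↔ L2 = []) :
    PySem.Chars.join sep (c :: L1) = PySem.Chars.join sep (c :: L2) := by
  rcases L1 with _ | ⟨p, L1⟩ <;> rcases L2 with _ | ⟨q, L2⟩
  · rfl
  · simp at he
  · simp at he
  · rw [PySem.Chars.join_cons_cons, PySem.Chars.join_cons_cons, h]

lemma join_pair_cons (sep p q : List Char) (rest : List (List Char)) :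
    PySem.Chars.join sep ((p ++ sep ++ q) :: rest) = PySem.Chars.join sep (p :: q :: rest) := by
  rcases rest with _ | ⟨r, rest⟩
  · simp [PySem.Chars.join_singleton, PySem.Chars.join_cons_cons]
  · rw [PySem.Chars.join_cons_cons, PySem.Chars.join_cons_cons, PySem.Chars.join_cons_cons]
    simp

-- B's paired-plus-tail list joins to the same string as flatTurns
lemma joinB_eq (u a : List (List Char)) :
    PySem.Chars.join ['\n']
      ((u.zip a).map (fun p => "User: ".toList ++ p.1 ++ ['\n'] ++ "AI: ".toList ++ p.2) ++
       ((u.drop (min u.length a.length)).map (fun x => "User: ".toList ++ x) ++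
        (a.drop (min u.length a.length)).map (fun y => "AI: ".toList ++ y))) =
    PySem.Chars.join ['\n'] (flatTurns u a) ∧
    (((u.zip a).map (fun p => "User: ".toList ++ p.1 ++ ['\n'] ++ "AI: ".toList ++ p.2) ++
       ((u.drop (min u.length a.length)).map (fun x => "User: ".toList ++ x) ++
        (a.drop (min u.length a.length)).map (fun y => "AI: ".toList ++ y))) = []
      ↔ flatTurns u a = []) := by
  induction u generalizing a with
  | nil => rcases a with _ | ⟨y, a⟩ <;> simp [flatTurns]
  | cons x u ih =>
    rcases a with _ | ⟨y, a⟩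
    · simp [flatTurns]
    · obtain ⟨ih1, ih2⟩ := ih a
      simp only [List.zip_cons_cons, List.map_cons, List.length_cons,
        Nat.succ_min_succ, List.drop_succ_cons, List.cons_append, flatTurns]
      constructor
      · rw [show ("User: ".toList ++ x ++ ['\n'] ++ "AI: ".toList ++ y)
              = ("User: ".toList ++ x) ++ ['\n'] ++ ("AI: ".toList ++ y) by simp]
        rw [join_pair_cons, PySem.Chars.join_cons_cons, PySem.Chars.join_cons_cons,
          join_cons_of ['\n'] ("AI: ".toList ++ y) ih1 ih2]
      · simp

-- ===== VERDICT (by name: the statement is the Claim_ definition above) =====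
theorem build_conversation_text_py_spec : Claim_equal_build_conversation_text_py := by
  intro user_text ai_text _
  show build_conversation_text_py user_text ai_text = build_conversation_text_py_alt user_text ai_text
  unfold build_conversation_text_py build_conversation_text_py_alt
  rw [splitTurns_eq, splitTurns_eq]
  set u := splitTurnsB user_text.toList with hu
  set a := splitTurnsB ai_text.toList with ha
  -- rewrite A's loop into the flatMap over List.range form
  have hfold :
      (PySem.List.pyRange 0 (max (PySem.List.len u) (PySem.List.len a)) 1).foldl (fun parts i =>
        let parts := if i < PySem.List.len u then parts ++ ["User: ".toList ++ PySem.List.pyGetD u i []] else parts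
        if i < PySem.List.len a then parts ++ ["AI: ".toList ++ PySem.List.pyGetD a i []] else parts) [] =
      (List.range (max u.length a.length)).flatMap (fun k =>
        (if k < u.length then ["User: ".toList ++ u.getD k []] else []) ++
        (if k < a.length then ["AI: ".toList ++ a.getD k []] else [])) := by
    have hmax : max (PySem.List.len u) (PySem.List.len a) = ((max u.length a.length : Nat) : Int) := by
      rw [PySem.List.len_eq, PySem.List.len_eq, Nat.cast_max]
    rw [hmax, PySem.List.pyRange_zero_natCast, List.foldl_map]
    have hstep : ∀ (acc : List (List Char)) (k : Nat),
        (fun parts i =>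
          let parts := if i < PySem.List.len u then parts ++ ["User: ".toList ++ PySem.List.pyGetD u i []] else parts
          if i < PySem.List.len a then parts ++ ["AI: ".toList ++ PySem.List.pyGetD a i []] else parts) acc ((k : Int)) =
        acc ++ ((if k < u.length then ["User: ".toList ++ u.getD k []] else []) ++
        (if k < a.length then ["AI: ".toList ++ a.getD k []] else [])) := by
      intro acc k
      simp only [PySem.List.len_eq, PySem.List.pyGetD_natCast, Nat.cast_lt]
      split_ifs <;> simp
    calc (List.range (max u.length a.length)).foldl _ [] =
        (List.range (max u.length a.length)).foldl (fun acc k =>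
          acc ++ ((if k < u.length then ["User: ".toList ++ u.getD k []] else []) ++
          (if k < a.length then ["AI: ".toList ++ a.getD k []] else []))) [] := by
          exact PySem.List.foldl_congr_mem _ _ _ [] (fun acc k _ => hstep acc k)
      _ = _ := by rw [PySem.List.foldl_append_eq_flatMap]; rfl
  simp only [hfold, partsA_eq]
  exact congrArg String.ofList (joinB_eq u a).1.symm
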